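-- pv_equiv track=rewrite | github.com/ozgunozerk/AI | UCS and A* comparison/UCS-A*-comparison .py | initial_state
-- ===== SOURCE A (Python) =====
-- def initial_state(matrix):
--   block_coordinates = []  # variable for storing block coordinates
--   goal_coordinates = []  # variable for storing goal coordinates
--   for m in range(len(matrix)):  # iterating through the matrix rows
--       for n in range(len(matrix[0])):  # iterating through the matrix columns
--           if matrix[m][n] == 'S':  # where block stays are also available place
--               block_coordinates.append([m,n])  # storing the coordinates of the block
--               matrix[m][n] = 'O'  # so setting them as available place
--   for k in range(len(matrix)):  # iterating through the matrix rows
--       for l in range(len(matrix[0])):  # iterating through the matrix rows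
--           if matrix[k][l] == 'G':  # finding the goal coordinates
--               matrix[k][l] = 'O'  # setting goal as available place
--               goal_coordinates.append([k,l])
--   return matrix, block_coordinates, goal_coordinates  # returning the results
-- ===== SOURCE B (Python) =====
-- def initial_state(matrix):
--     def scan_row(row, m):
--         new_row, s_found, g_found = [], [], []
--         for n, cell in enumerate(row):
--             if cell == 'S':
--                 new_row.append('O')
--                 s_found.append([m, n])
--             elif cell == 'G':
--                 new_row.append('O')
--                 g_found.append([m, n])
--             else:
--                 new_row.append(cell)
--         return new_row, s_found, g_found
--
--     grid, block_coordinates, goal_coordinates = [], [], []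
--     for m, row in enumerate(matrix):
--         new_row, s_found, g_found = scan_row(row, m)
--         grid.append(new_row)
--         block_coordinates += s_found
--         goal_coordinates += g_found
--     return grid, block_coordinates, goal_coordinates
-- ===== Notes on version B (the rewrite author's own statement) =====
-- stated objective: alternative
-- what changed: A makes two staged full-grid in-place scans bounded by len(matrix[0]) (first replacing all 'S', then rescanning the whole mutated grid for 'G'); B makes one pass, decomposed into a per-row helper that walks each row once with an if/elif dispatch maintaining three accumulators (new row, S-coords, G-coords) and builds a fresh grid, never mutating its argument (the equivalence proved is about the return value; A mutates its argument, B does not).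
-- intended difference: On ragged matrices where some row longer than row 0 carries an 'S' or 'G' at a column index >= len(matrix[0]), A silently leaves that marker in place and omits its coordinates (an accident of bounding both column loops by len(matrix[0])), while B clears it to 'O' and records its coordinates, the intended behaviour of a grid marker search. — e.g. on initial_state([["O"], ["X", "S"]]): A returns ([["O"], ["X", "S"]], [], []), B returns ([["O"], ["X", "O"]], [[1, 1]], [])
import Mathlib
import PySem

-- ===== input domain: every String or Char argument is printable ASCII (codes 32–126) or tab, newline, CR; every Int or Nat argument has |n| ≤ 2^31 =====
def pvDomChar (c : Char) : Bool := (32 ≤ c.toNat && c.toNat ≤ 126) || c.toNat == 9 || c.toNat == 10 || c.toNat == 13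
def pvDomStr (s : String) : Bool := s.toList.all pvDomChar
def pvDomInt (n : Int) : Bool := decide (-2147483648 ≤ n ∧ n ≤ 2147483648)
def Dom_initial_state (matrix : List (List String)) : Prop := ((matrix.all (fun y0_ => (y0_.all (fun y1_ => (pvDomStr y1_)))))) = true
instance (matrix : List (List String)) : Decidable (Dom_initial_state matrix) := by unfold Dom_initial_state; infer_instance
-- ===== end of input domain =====

-- B replaces A's two staged in-place full-grid scans by ONE pass decomposed into a per-row
-- helper carrying three accumulators, building a fresh grid (A mutates its argument, B does
-- not; the equivalence proved is about the return value).

-- ===== PORT A =====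
-- literal transliteration of A: two nested index loops over range(len(matrix)) × range(len(matrix[0])),
-- mutating the matrix in place; in-range reads/writes are modelled with getD/set (Pre_ puts the
-- out-of-range reads, on which Python raises IndexError, outside the claim)
def initial_state (matrix : List (List String)) : List (List String) × List (List Int) × List (List Int) :=
  let s1 := (List.range matrix.length).foldl (fun (st : List (List String) × List (List Int)) m =>
    (List.range (st.1.headD []).length).foldl (fun st n =>
      if (st.1.getD m []).getD n "" = "S" then
        (st.1.set m ((st.1.getD m []).set n "O"), st.2 ++ [[(m : Int), (n : Int)]])
      else st) st) (matrix, [])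
  let s2 := (List.range s1.1.length).foldl (fun (st : List (List String) × List (List Int)) k =>
    (List.range (st.1.headD []).length).foldl (fun st l =>
      if (st.1.getD k []).getD l "" = "G" then
        (st.1.set k ((st.1.getD k []).set l "O"), st.2 ++ [[(k : Int), (l : Int)]])
      else st) st) (s1.1, [])
  (s2.1, s1.2, s2.2)

-- ===== PORT B =====
-- per-row helper of Source B: one walk over the row, three accumulators, if/elif dispatch
def pvScanRowB (row : List String) (m : Int) : List String × List (List Int) × List (List Int) :=
  (PySem.List.enumerate row).foldl (fun (st : List String × List (List Int) × List (List Int)) q =>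
    if q.2 = "S" then (st.1 ++ ["O"], st.2.1 ++ [[m, q.1]], st.2.2)
    else if q.2 = "G" then (st.1 ++ ["O"], st.2.1, st.2.2 ++ [[m, q.1]])
    else (st.1 ++ [q.2], st.2.1, st.2.2)) ([], [], [])

def initial_state_alt (matrix : List (List String)) : List (List String) × List (List Int) × List (List Int) :=
  (PySem.List.enumerate matrix).foldl (fun (st : List (List String) × List (List Int) × List (List Int)) p =>
    let r := pvScanRowB p.2 p.1
    (st.1 ++ [r.1], st.2.1 ++ r.2.1, st.2.2 ++ r.2.2)) ([], [], [])

-- ===== PRECONDITION & SPEC =====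
-- Pre_ excludes exactly the ragged matrices with a row shorter than row 0, on which Python A
-- raises IndexError.
def Pre_initial_state (matrix : List (List String)) : Prop :=
  ∀ row ∈ matrix, (matrix.headD []).length ≤ row.length
instance (matrix : List (List String)) : Decidable (Pre_initial_state matrix) := by
  unfold Pre_initial_state; infer_instance
def pvWitness_initial_state : List (List String) := [["S", "G"], ["O", "X"]]

-- On ragged matrices where some row longer than row 0 carries an 'S' or 'G' at a column index
-- ≥ len(matrix[0]), A silently leaves that marker in place and omits its coordinates (an accident
-- of bounding both column loops by len(matrix[0])), while B clears it to 'O' and records its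
-- coordinates, the intended behaviour of a grid marker search.
def D_initial_state (matrix : List (List String)) : Prop :=
  ∃ row ∈ matrix, ∃ x ∈ row.drop (matrix.headD []).length, x = "S" ∨ x = "G"
instance (matrix : List (List String)) : Decidable (D_initial_state matrix) := by
  unfold D_initial_state; infer_instance

def Spec_initial_state (matrix : List (List String)) (out : List (List String) × List (List Int) × List (List Int)) : Prop := ¬ D_initial_state matrix → out = initial_state_alt matrix
instance (matrix : List (List String)) (out : List (List String) × List (List Int) × List (List Int)) : Decidable (Spec_initial_state matrix out) := by unfold Spec_initial_state; infer_instance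

def pvDiffWitness_initial_state : List (List String) := [["O"], ["X", "S"]]
def pvDiffWitnessOut_initial_state : (List (List String) × List (List Int) × List (List Int)) × (List (List String) × List (List Int) × List (List Int)) :=
  (([["O"], ["X", "S"]], [], []), ([["O"], ["X", "O"]], [[1, 1]], []))

-- ===== CLAIM (what is proved, stated in full; the proofs are below) =====
def Claim_unchanged_initial_state : Prop := ∀ (matrix : List (List String)), Dom_initial_state matrix → Pre_initial_state matrix → Spec_initial_state matrix (initial_state matrix)
def Claim_changed_initial_state : Prop := Dom_initial_state (pvDiffWitness_initial_state) ∧ Pre_initial_state (pvDiffWitness_initial_state) ∧ D_initial_state (pvDiffWitness_initial_state) ∧ initial_state (pvDiffWitness_initial_state) = pvDiffWitnessOut_initial_state.1 ∧ initial_state_alt (pvDiffWitness_initial_state) = pvDiffWitnessOut_initial_state.2 ∧ pvDiffWitnessOut_initial_state.1 ≠ pvDiffWitnessOut_initial_state.2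

-- ===== LEMMAS AND PROOFS =====

-- one in-place scan for target t, as written in port A (used only in the proofs)
def pvScan (t : String) (mat : List (List String)) : List (List String) × List (List Int) :=
  (List.range mat.length).foldl (fun (st : List (List String) × List (List Int)) m =>
    (List.range (st.1.headD []).length).foldl (fun st n =>
      if (st.1.getD m []).getD n "" = t then
        (st.1.set m ((st.1.getD m []).set n "O"), st.2 ++ [[(m : Int), (n : Int)]])
      else st) st) (mat, [])

theorem initial_state_eq_scan (matrix : List (List String)) :
    initial_state matrix =
      ((pvScan "G" (pvScan "S" matrix).1).1, (pvScan "S" matrix).2,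
        (pvScan "G" (pvScan "S" matrix).1).2) := rfl

-- the effect of scanning the first c cells of one row
def pvRowSet (t : String) (row : List String) : Nat → List String
  | 0 => row
  | c + 1 => let r := pvRowSet t row c; if r.getD c "" = t then r.set c "O" else r

def pvRowPos (t : String) (row : List String) : Nat → List Nat
  | 0 => []
  | c + 1 => pvRowPos t row c ++ (if (pvRowSet t row c).getD c "" = t then [c] else [])

theorem pvRowSet_length (t : String) (row : List String) (c : Nat) :
    (pvRowSet t row c).length = row.length := by
  induction c with
  | zero => rfl
  | succ c ih => simp only [pvRowSet]; split <;> simp [ih]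

theorem pvRowSet_getElem? (t : String) (row : List String) (c n : Nat) :
    (pvRowSet t row c)[n]? = row[n]?.map (fun x => if n < c ∧ x = t then "O" else x) := by
  induction c generalizing n with
  | zero => cases h : row[n]? <;> simp [pvRowSet, h]
  | succ c ih =>
    have hlen := pvRowSet_length t row c
    have hgd : (pvRowSet t row c).getD c "" =
        (row[c]?.map (fun x => if c < c ∧ x = t then "O" else x)).getD "" := by
      rw [List.getD_eq_getElem?_getD, ih c]
    simp only [Nat.lt_irrefl, false_and, if_false, Option.map_id'] at hgd
    simp only [pvRowSet]
    by_cases hc : (pvRowSet t row c).getD c "" = t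
    · rw [if_pos hc, List.getElem?_set]
      by_cases hnc : c = n
      · subst hnc
        rcases h : row[c]? with _ | x
        · have hge : row.length ≤ c := by
            by_contra hcon
            exact absurd h (by simp [List.getElem?_eq_getElem (Nat.lt_of_not_le hcon)])
          simp [hlen, Nat.not_lt.mpr hge]
        · have hx : x = t := by
            rw [h] at hgd
            have h2 := hc.symm.trans hgd
            simp at h2
            exact h2.symm
          have hn : c < row.length := by
            by_contra hcon
            rw [List.getElem?_eq_none (Nat.le_of_not_lt hcon)] at h
            cases h
          simp [hlen, hn, hx]
      · rw [if_neg hnc, ih n]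
        rcases h : row[n]? with _ | x
        · simp
        · simp only [Option.map_some, Option.some.injEq]
          have : (n < c ∧ x = t) ↔ (n < c + 1 ∧ x = t) := by
            constructor
            · rintro ⟨h1, h2⟩; exact ⟨Nat.lt_succ_of_lt h1, h2⟩
            · rintro ⟨h1, h2⟩
              rcases Nat.lt_succ_iff_lt_or_eq.mp h1 with h1 | h1
              · exact ⟨h1, h2⟩
              · exact absurd h1.symm hnc
          rw [if_congr this rfl rfl]
    · rw [if_neg hc, ih n]
      rcases h : row[n]? with _ | x
      · simp
      · simp only [Option.map_some, Option.some.injEq]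
        by_cases hnc : n = c
        · subst hnc
          have hx : x ≠ t := by
            rw [h] at hgd
            intro hxt
            exact hc (hgd.trans (by simp [hxt]))
          simp [hx]
        · have : (n < c ∧ x = t) ↔ (n < c + 1 ∧ x = t) := by
            constructor
            · rintro ⟨h1, h2⟩; exact ⟨Nat.lt_succ_of_lt h1, h2⟩
            · rintro ⟨h1, h2⟩
              rcases Nat.lt_succ_iff_lt_or_eq.mp h1 with h1 | h1
              · exact ⟨h1, h2⟩
              · exact absurd h1 hnc
          rw [if_congr this rfl rfl]

-- the partially-rewritten row still reads its original value at any not-yet-visited column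
theorem pvRowSet_getD_self (t : String) (row : List String) (c : Nat) :
    (pvRowSet t row c).getD c "" = row.getD c "" := by
  rw [List.getD_eq_getElem?_getD, List.getD_eq_getElem?_getD, pvRowSet_getElem?]
  cases row[c]? <;> simp

theorem pvRowPos_eq_filter (t : String) (row : List String) (c : Nat) :
    pvRowPos t row c = (List.range c).filter (fun n => decide (row.getD n "" = t)) := by
  induction c with
  | zero => rfl
  | succ c ih =>
    simp only [pvRowPos, List.range_succ, List.filter_append, ih, pvRowSet_getD_self]
    rw [List.getD_eq_getElem?_getD] at *
    by_cases h : row[c]?.getD "" = t <;> simp [h, List.filter]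

-- reading a cell "≠ O and ≠ t" through a t-scan is reading the original cell
theorem pvRowSet_getD_iff (t u : String) (hu : u ≠ "O") (htu : t ≠ u)
    (row : List String) (c n : Nat) :
    ((pvRowSet t row c).getD n "" = u) ↔ (row.getD n "" = u) := by
  rw [List.getD_eq_getElem?_getD, List.getD_eq_getElem?_getD, pvRowSet_getElem?]
  rcases h : row[n]? with _ | x
  · simp
  · simp only [Option.map_some, Option.getD_some]
    split_ifs with hif
    · constructor
      · intro h2; exact absurd h2.symm hu
      · intro h2; exact absurd (hif.2.symm.trans h2) htu
    · exact Iff.rfl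

theorem pvScan_inner (t : String) (c : Nat) (mat : List (List String))
    (acc : List (List Int)) (m : Nat) (hm : m < mat.length) :
    (List.range c).foldl (fun (st : List (List String) × List (List Int)) n =>
      if (st.1.getD m []).getD n "" = t then
        (st.1.set m ((st.1.getD m []).set n "O"), st.2 ++ [[(m : Int), (n : Int)]])
      else st) (mat, acc)
    = (mat.set m (pvRowSet t (mat.getD m []) c),
       acc ++ (pvRowPos t (mat.getD m []) c).map (fun n : Nat => [(m : Int), (n : Int)])) := by
  induction c with
  | zero =>
    simp only [List.range_zero, List.foldl_nil, pvRowSet, pvRowPos]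
    rw [List.getD_eq_getElem?_getD, List.getElem?_eq_getElem hm]
    simp
  | succ c ih =>
    rw [List.range_succ, List.foldl_append, ih, List.foldl_cons, List.foldl_nil]
    have hget : ((mat.set m (pvRowSet t (mat.getD m []) c)).getD m []) =
        pvRowSet t (mat.getD m []) c := by
      rw [List.getD_eq_getElem?_getD, List.getElem?_set_self (by simpa using hm)]
      simp
    simp only [hget, pvRowSet, pvRowPos]
    split_ifs with hcond
    · rw [List.set_set]
      simp
    · simp

theorem pvScan_outer (t : String) (mat : List (List String)) (k : Nat) (hk : k ≤ mat.length) :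
    (List.range k).foldl (fun (st : List (List String) × List (List Int)) m =>
      (List.range (st.1.headD []).length).foldl (fun st n =>
        if (st.1.getD m []).getD n "" = t then
          (st.1.set m ((st.1.getD m []).set n "O"), st.2 ++ [[(m : Int), (n : Int)]])
        else st) st) (mat, [])
    = ((mat.take k).map (fun row => pvRowSet t row (mat.headD []).length) ++ mat.drop k,
       (PySem.List.enumerate (mat.take k)).flatMap (fun p =>
         (pvRowPos t p.2 (mat.headD []).length).map (fun n : Nat => [p.1, (n : Int)]))) := by
  induction k with
  | zero => simp
  | succ k ih =>
    have hk' : k ≤ mat.length := Nat.le_of_succ_le hk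
    have hklt : k < mat.length := hk
    rw [List.range_succ, List.foldl_append, ih hk', List.foldl_cons, List.foldl_nil]
    set c0 := (mat.headD []).length with hc0
    set f : List String → List String := fun row => pvRowSet t row c0 with hf
    set matk := (mat.take k).map f ++ mat.drop k with hmatk
    have hlenpre : ((mat.take k).map f).length = k := by
      simp [Nat.min_eq_left hk']
    have hlenk : matk.length = mat.length := by
      simp only [hmatk, List.length_append, hlenpre, List.length_drop]
      omega
    have hhead : (matk.headD []).length = c0 := by
      rcases mat with _ | ⟨r0, rs⟩
      · simp at hklt
      · rcases k with _ | k
        · simp [hmatk, hc0]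
        · simp [hmatk, hf, pvRowSet_length, hc0]
    have hgetk : matk.getD k [] = mat[k] := by
      rw [hmatk, List.getD_eq_getElem?_getD,
        List.getElem?_append_right (by rw [hlenpre])]
      rw [hlenpre, Nat.sub_self, List.getElem?_drop, Nat.add_zero,
        List.getElem?_eq_getElem hklt]
      rfl
    have hset : matk.set k (f mat[k]) = (mat.take (k + 1)).map f ++ mat.drop (k + 1) := by
      rw [hmatk, List.set_append, if_neg (by omega)]
      rw [hlenpre, Nat.sub_self, List.drop_eq_getElem_cons hklt]
      simp only [List.set_cons_zero]
      rw [List.take_add_one, List.getElem?_eq_getElem hklt]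
      simp only [Option.toList_some, List.map_append, List.map_cons, List.map_nil,
        List.map_take]
      simp
    have henum : PySem.List.enumerate (mat.take (k + 1)) 0 =
        PySem.List.enumerate (mat.take k) 0 ++ [((k : Int), mat[k])] := by
      rw [List.take_add_one, List.getElem?_eq_getElem hklt]
      simp only [Option.toList_some, PySem.List.enumerate_append,
        PySem.List.enumerate_cons, PySem.List.enumerate_nil]
      rw [List.length_take, Nat.min_eq_left hk']
      simp
    rw [hhead, pvScan_inner t c0 matk _ k (hlenk ▸ hklt), hgetk, hset, henum]
    simp

theorem pvScan_eq (t : String) (mat : List (List String)) :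
    pvScan t mat =
      (mat.map (fun row => pvRowSet t row (mat.headD []).length),
       (PySem.List.enumerate mat).flatMap (fun p =>
         (pvRowPos t p.2 (mat.headD []).length).map (fun n : Nat => [p.1, (n : Int)]))) := by
  unfold pvScan
  rw [pvScan_outer t mat mat.length le_rfl]
  simp

theorem pvEnumerate_map {A B : Type} (f : A → B) (l : List A) (s : Int) :
    PySem.List.enumerate (l.map f) s =
      (PySem.List.enumerate l s).map (fun p => (p.1, f p.2)) := by
  induction l generalizing s with
  | nil => simp [PySem.List.enumerate_nil]
  | cons x xs ih => simp [PySem.List.enumerate_cons, ih]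

-- the two successive one-target row scans, per cell
theorem pvRow_final (row : List String) (c : Nat) :
    pvRowSet "G" (pvRowSet "S" row c) c =
      (PySem.List.enumerate row).map (fun q =>
        if q.1 < (c : Int) ∧ (q.2 = "S" ∨ q.2 = "G") then "O" else q.2) := by
  apply List.ext_getElem?
  intro n
  rw [pvRowSet_getElem?, pvRowSet_getElem?, List.getElem?_map,
    PySem.List.getElem?_enumerate]
  rcases h : row[n]? with _ | x
  · simp
  · simp only [Option.map_some]
    by_cases hn : n < c
    · by_cases hS : x = "S"
      · subst hS
        simp [hn]
      · by_cases hG : x = "G"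
        · subst hG
          simp [hn]
        · simp [hn, hS, hG]
    · simp [hn]

-- ---------- B-side closed forms ----------

def pvOutCell (x : String) : String :=
  if x = "S" then "O" else if x = "G" then "O" else x

theorem pvScanRowB_loop (row : List String) (m : Int) (s : Int)
    (a : List String) (b g : List (List Int)) :
    (PySem.List.enumerate row s).foldl (fun (st : List String × List (List Int) × List (List Int)) q =>
      if q.2 = "S" then (st.1 ++ ["O"], st.2.1 ++ [[m, q.1]], st.2.2)
      else if q.2 = "G" then (st.1 ++ ["O"], st.2.1, st.2.2 ++ [[m, q.1]])
      else (st.1 ++ [q.2], st.2.1, st.2.2)) (a, b, g)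
    = (a ++ row.map pvOutCell,
       b ++ (((PySem.List.enumerate row s).filter (fun q => decide (q.2 = "S"))).map (fun q => [m, q.1])),
       g ++ (((PySem.List.enumerate row s).filter (fun q => decide (q.2 = "G"))).map (fun q => [m, q.1]))) := by
  induction row generalizing s a b g with
  | nil => simp [PySem.List.enumerate_nil]
  | cons x xs ih =>
    simp only [PySem.List.enumerate_cons, List.foldl_cons, List.filter_cons]
    by_cases hS : x = "S"
    · subst hS
      rw [if_pos rfl, ih]
      simp [pvOutCell]
    · rw [if_neg hS]
      by_cases hG : x = "G"
      · subst hG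
        rw [if_pos rfl, ih]
        simp [pvOutCell, hS]
      · rw [if_neg hG, ih]
        simp [pvOutCell, hS, hG]

theorem pvScanRowB_eq (row : List String) (m : Int) :
    pvScanRowB row m =
      (row.map pvOutCell,
       ((PySem.List.enumerate row).filter (fun q => decide (q.2 = "S"))).map (fun q => [m, q.1]),
       ((PySem.List.enumerate row).filter (fun q => decide (q.2 = "G"))).map (fun q => [m, q.1])) := by
  unfold pvScanRowB
  rw [pvScanRowB_loop]
  simp

theorem initial_state_alt_loop (mat : List (List String)) (s : Int)
    (a : List (List String)) (b g : List (List Int)) :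
    (PySem.List.enumerate mat s).foldl (fun (st : List (List String) × List (List Int) × List (List Int)) p =>
      let r := pvScanRowB p.2 p.1
      (st.1 ++ [r.1], st.2.1 ++ r.2.1, st.2.2 ++ r.2.2)) (a, b, g)
    = (a ++ mat.map (fun row => row.map pvOutCell),
       b ++ (PySem.List.enumerate mat s).flatMap (fun p =>
         ((PySem.List.enumerate p.2).filter (fun q => decide (q.2 = "S"))).map (fun q => [p.1, q.1])),
       g ++ (PySem.List.enumerate mat s).flatMap (fun p =>
         ((PySem.List.enumerate p.2).filter (fun q => decide (q.2 = "G"))).map (fun q => [p.1, q.1]))) := by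
  induction mat generalizing s a b g with
  | nil => simp [PySem.List.enumerate_nil]
  | cons r rs ih =>
    simp only [PySem.List.enumerate_cons, List.foldl_cons, List.flatMap_cons]
    rw [pvScanRowB_eq, ih]
    simp

theorem initial_state_alt_eq (mat : List (List String)) :
    initial_state_alt mat =
      (mat.map (fun row => row.map pvOutCell),
       (PySem.List.enumerate mat).flatMap (fun p =>
         ((PySem.List.enumerate p.2).filter (fun q => decide (q.2 = "S"))).map (fun q => [p.1, q.1])),
       (PySem.List.enumerate mat).flatMap (fun p =>
         ((PySem.List.enumerate p.2).filter (fun q => decide (q.2 = "G"))).map (fun q => [p.1, q.1]))) := by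
  unfold initial_state_alt
  rw [initial_state_alt_loop]
  simp

-- enumerate-filter of a row as a range-filter over its indices
theorem pvEnumFilter_eq_range (t : String) (row : List String) (m s : Int) :
    ((PySem.List.enumerate row s).filter (fun q => decide (q.2 = t))).map (fun q => [m, q.1]) =
      ((List.range row.length).filter (fun n => decide (row.getD n "" = t))).map
        (fun n : Nat => [m, s + (n : Int)]) := by
  induction row generalizing s with
  | nil => simp [PySem.List.enumerate_nil]
  | cons x xs ih =>
    have hcompP : ((fun n : Nat => decide ((x :: xs).getD n "" = t)) ∘ Nat.succ)
        = (fun n : Nat => decide (xs.getD n "" = t)) := by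
      funext n
      simp
    have hcompF : ((fun n : Nat => ([m, s + (n : Int)] : List Int)) ∘ Nat.succ)
        = (fun n : Nat => [m, s + 1 + (n : Int)]) := by
      funext n
      simp only [Function.comp, List.cons.injEq, and_true, true_and]
      push_cast
      ring
    simp only [PySem.List.enumerate_cons, List.filter_cons, List.length_cons,
      List.range_succ_eq_map, List.getD_cons_zero]
    rw [List.filter_map]
    by_cases hx : x = t
    · rw [if_pos (by simp [hx]), if_pos (by simp [hx])]
      rw [List.map_cons, List.map_cons, List.map_map, hcompP, hcompF, ← ih (s + 1)]
      simp
    · rw [if_neg (by simp [hx]), if_neg (by simp [hx])]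
      rw [List.map_map, hcompP, hcompF, ← ih (s + 1)]

-- if no hit at index ≥ c, the range-filter truncates from row.length to c
theorem pvRangeFilter_trunc (t : String) (row : List String) (c : Nat)
    (hc : c ≤ row.length)
    (hnd : ∀ x ∈ row.drop c, ¬ x = t) :
    (List.range row.length).filter (fun n => decide (row.getD n "" = t)) =
      (List.range c).filter (fun n => decide (row.getD n "" = t)) := by
  have hsplit : row.length = c + (row.length - c) := by omega
  rw [hsplit, List.range_add, List.filter_append]
  have hnil : ((List.range (row.length - c)).map (fun j => c + j)).filter
      (fun n => decide (row.getD n "" = t)) = [] := by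
    rw [List.filter_eq_nil_iff]
    intro n hn
    rw [List.mem_map] at hn
    obtain ⟨j, hj, rfl⟩ := hn
    rw [List.mem_range] at hj
    have hlt : c + j < row.length := by omega
    have hmem : row[c + j] ∈ row.drop c := by
      have hgm := List.getElem_mem (l := row.drop c) (n := j)
        (by rw [List.length_drop]; omega)
      rwa [List.getElem_drop] at hgm
    rw [List.getD_eq_getElem?_getD, List.getElem?_eq_getElem hlt]
    simpa using hnd _ hmem
  rw [hnil, List.append_nil]

-- flatMap congruence on members
theorem pvFlatMap_congr {A B : Type} (l : List A) (f g : A → List B)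
    (h : ∀ a ∈ l, f a = g a) : l.flatMap f = l.flatMap g := by
  induction l with
  | nil => rfl
  | cons x xs ih =>
    simp only [List.flatMap_cons, h x (List.mem_cons_self), ih (fun a ha => h a (List.mem_cons_of_mem _ ha))]

-- per-row coordinate list, from A's range-filter form to B's enumerate-filter form
theorem pvCoordRow (t : String) (row : List String) (m : Int) (c : Nat)
    (hc : c ≤ row.length) (hnd : ∀ x ∈ row.drop c, ¬ x = t) :
    ((List.range c).filter (fun n => decide (row.getD n "" = t))).map (fun n : Nat => [m, (n : Int)]) =
      ((PySem.List.enumerate row).filter (fun q => decide (q.2 = t))).map (fun q => [m, q.1]) := by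
  rw [pvEnumFilter_eq_range t row m 0, pvRangeFilter_trunc t row c hc hnd]
  apply List.map_congr_left
  intro n _
  norm_num

-- ===== VERDICT (by name: the statements are the Claim_ definitions above) =====
theorem initial_state_spec : Claim_unchanged_initial_state := by
  intro matrix hdom hpre
  unfold Spec_initial_state
  intro hnd
  rw [initial_state_eq_scan, initial_state_alt_eq]
  set mat := matrix with hmat
  set c := (mat.headD []).length with hc
  have hrowlen : ∀ row ∈ mat, c ≤ row.length := hpre
  have hrownd : ∀ row ∈ mat, ∀ x ∈ row.drop c, ¬ (x = "S" ∨ x = "G") := by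
    intro row hrow x hx hor
    exact hnd ⟨row, hrow, x, hx, hor⟩
  have hndS : ∀ row ∈ mat, ∀ x ∈ row.drop c, ¬ x = "S" := by
    intro row hrow x hx hS
    exact hrownd row hrow x hx (Or.inl hS)
  have hndG : ∀ row ∈ mat, ∀ x ∈ row.drop c, ¬ x = "G" := by
    intro row hrow x hx hG
    exact hrownd row hrow x hx (Or.inr hG)
  rcases hm : mat with _ | ⟨r0, rs⟩
  · rfl
  · rw [← hm]
    have hhead2 : ((mat.map (fun row => pvRowSet "S" row c)).headD []).length = c := by
      rw [hm]
      simp only [List.map_cons, List.headD_cons, pvRowSet_length]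
      rw [hc, hm]
      rfl
    rw [pvScan_eq "S" mat]
    simp only [← hc]
    rw [pvScan_eq "G" (mat.map (fun row => pvRowSet "S" row c))]
    simp only [hhead2]
    refine Prod.ext ?_ (Prod.ext ?_ ?_)
    · -- matrices
      show (mat.map (fun row => pvRowSet "S" row c)).map (fun row => pvRowSet "G" row c) = _
      rw [List.map_map]
      apply List.map_congr_left
      intro row hrow
      simp only [Function.comp]
      rw [pvRow_final row c]
      apply List.ext_getElem?
      intro n
      rw [List.getElem?_map, PySem.List.getElem?_enumerate, List.getElem?_map]
      rcases h : row[n]? with _ | x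
      · simp
      · have hnlt : n < row.length := by
          by_contra hcon
          rw [List.getElem?_eq_none (Nat.le_of_not_lt hcon)] at h
          cases h
        simp only [Option.map_some, Option.some.injEq, Int.zero_add]
        by_cases hmark : x = "S" ∨ x = "G"
        · have hnc : n < c := by
            by_contra hcon
            have hge : c ≤ n := Nat.le_of_not_lt hcon
            have hcn : c + (n - c) = n := by omega
            have hgm := List.getElem_mem (l := row.drop c) (n := n - c)
              (by rw [List.length_drop]; omega)
            rw [List.getElem_drop] at hgm
            simp only [hcn] at hgm
            have hxx : row[n]'hnlt = x :=
              Option.some.inj ((List.getElem?_eq_getElem hnlt).symm.trans h)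
            rw [hxx] at hgm
            exact absurd hmark (hrownd row hrow x hgm)
          rcases hmark with hx | hx <;>
            simp [hx, pvOutCell, Int.ofNat_lt.mpr hnc]
        · rw [not_or] at hmark
          simp [pvOutCell, hmark.1, hmark.2]
    · -- block coordinates
      show (PySem.List.enumerate mat).flatMap
          (fun p => (pvRowPos "S" p.2 c).map (fun n : Nat => [p.1, (n : Int)])) = _
      apply pvFlatMap_congr
      intro p hp
      have hpm : p.2 ∈ mat := by
        rcases (PySem.List.mem_enumerate_iff _ _ _).mp hp with ⟨k, hk, hpe⟩
        rw [hpe]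
        exact List.getElem_mem _
      rw [pvRowPos_eq_filter]
      exact pvCoordRow "S" p.2 p.1 c (hrowlen p.2 hpm) (hndS p.2 hpm)
    · -- goal coordinates
      show (PySem.List.enumerate (mat.map (fun row => pvRowSet "S" row c))).flatMap
          (fun p => (pvRowPos "G" p.2 c).map (fun n : Nat => [p.1, (n : Int)])) = _
      rw [pvEnumerate_map, List.flatMap_map]
      apply pvFlatMap_congr
      intro p hp
      have hpm : p.2 ∈ mat := by
        rcases (PySem.List.mem_enumerate_iff _ _ _).mp hp with ⟨k, hk, hpe⟩
        rw [hpe]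
        exact List.getElem_mem _
      rw [pvRowPos_eq_filter]
      have hfc : (List.range c).filter
          (fun n => decide ((pvRowSet "S" p.2 c).getD n "" = "G")) =
          (List.range c).filter (fun n => decide (p.2.getD n "" = "G")) := by
        apply List.filter_congr
        intro n _
        exact decide_eq_decide.mpr (pvRowSet_getD_iff "S" "G" (by decide) (by decide) p.2 c n)
      rw [hfc]
      exact pvCoordRow "G" p.2 p.1 c (hrowlen p.2 hpm) (hndG p.2 hpm)

theorem initial_state_changed : Claim_changed_initial_state := by
  unfold Claim_changed_initial_state
  decide
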